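-- pv_equiv track=rewrite | github.com/EnguerranVidal/Orbitales-Atomiques-FR | tableau_periodique.py | list_name
-- ===== SOURCE A (Python) =====
-- def list_name(Catalogue): # Nous permet d'accéder à la liste des noms et symboles des élements du tableau
--     n=len(Catalogue)
--     Names=[]
--     for i in range(n):
--         name=Catalogue[i][0]
--         symbol=Catalogue[i][1]
--         Names.append(name)
--         Names.append(symbol)
--     return Names
-- ===== SOURCE B (Python) =====
-- def list_name(Catalogue):
--     names = [row[0] for row in Catalogue]
--     symbols = [row[1] for row in Catalogue]
--     return [field for pair in zip(names, symbols) for field in pair]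
-- ===== Notes on version B (the rewrite author's own statement) =====
-- stated objective: alternative
-- what changed: Replaces the single index-driven loop appending two fields per row with two column-wise extraction passes followed by a zip interleave.
import Mathlib
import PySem

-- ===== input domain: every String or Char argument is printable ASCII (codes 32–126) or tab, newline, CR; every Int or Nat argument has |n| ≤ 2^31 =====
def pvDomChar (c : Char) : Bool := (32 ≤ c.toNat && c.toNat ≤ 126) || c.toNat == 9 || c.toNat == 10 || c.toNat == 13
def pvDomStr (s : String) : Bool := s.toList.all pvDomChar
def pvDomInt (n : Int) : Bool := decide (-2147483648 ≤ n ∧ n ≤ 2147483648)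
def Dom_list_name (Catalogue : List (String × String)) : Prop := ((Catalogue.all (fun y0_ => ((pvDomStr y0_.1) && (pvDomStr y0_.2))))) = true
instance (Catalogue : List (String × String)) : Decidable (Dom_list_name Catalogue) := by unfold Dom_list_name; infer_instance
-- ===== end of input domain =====

-- ===== PORT A =====
-- B replaces the single row loop of A with column extraction plus zip interleaving (alternative decomposition).
def list_name (Catalogue : List (String × String)) : List String :=
  let n := Catalogue.length
  (List.range n).foldl (fun Names i =>
    let row := Catalogue.getD i ("", "")
    let name := row.1
    let symbol := row.2
    (Names ++ [name]) ++ [symbol]) []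

-- ===== PORT B =====
def list_name_alt (Catalogue : List (String × String)) : List String :=
  let names := Catalogue.map Prod.fst
  let symbols := Catalogue.map Prod.snd
  (names.zip symbols).flatMap (fun pair => [pair.1, pair.2])

-- ===== PRECONDITION & SPEC =====
def Spec_list_name (Catalogue : List (String × String)) (out : List String) : Prop := out = list_name_alt Catalogue
instance (Catalogue : List (String × String)) (out : List String) : Decidable (Spec_list_name Catalogue out) := by unfold Spec_list_name; infer_instance

-- ===== CLAIM (what is proved, stated in full; the proofs are below) =====
def Claim_equal_list_name : Prop := ∀ (Catalogue : List (String × String)), Dom_list_name Catalogue → Spec_list_name Catalogue (list_name Catalogue)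

-- ===== LEMMAS AND PROOFS =====

-- ===== VERDICT (by name: the statement is the Claim_ definition above) =====
theorem foldl_range_interleave (l : List (String × String)) (acc : List String) :
    (List.range l.length).foldl (fun Names i =>
      (Names ++ [(l.getD i ("", "")).1]) ++ [(l.getD i ("", "")).2]) acc
    = acc ++ l.flatMap (fun r => [r.1, r.2]) := by
  induction l generalizing acc with
  | nil => simp
  | cons x xs ih =>
      simp only [List.length_cons, List.range_succ_eq_map, List.foldl_cons, List.foldl_map,
        List.getD_cons_zero, List.getD_cons_succ, List.flatMap_cons]
      rw [ih]
      simp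

theorem list_name_spec : Claim_equal_list_name := by
  intro Catalogue _
  unfold Spec_list_name list_name list_name_alt
  simp only []
  rw [foldl_range_interleave]
  simp [List.zip_map', List.map_id']
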